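-- pv_equiv track=rewrite | github.com/electroms/Travaux_Python | tp3-script-exo1_a_3.py | compter_connexions_par_protocoles
-- ===== SOURCE A (Python) =====
-- def compter_connexions_par_protocoles(connexions_par_protocole):
--     """
--     Sépare et compte les connexions par protocoles connus (http, https, ssh, dns, etc.)
--     et regroupe les autres sous 'autres'.
--     """
--     protocoles_connus = {
--         "http": ["http", "80"],
--         "https": ["https", "443"],
--         "ssh": ["ssh", "22"],
--         "dns": ["dns", "53"],
--         "ftp": ["ftp", "21"],
--         "smtp": ["smtp", "25"],
--         "pop3": ["pop3", "110"],
--         "imap": ["imap", "143"],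
--         "telnet": ["telnet", "23"],
--     }
--     compte = {proto: 0 for proto in protocoles_connus}
--     compte["autres"] = 0
--
--     for protocole, count in connexions_par_protocole.items():
--         trouve = False
--         for proto, aliases in protocoles_connus.items():
--             if protocole.lower() in aliases or protocole.lower() == proto:
--                 compte[proto] += count
--                 trouve = True
--                 break
--         if not trouve:
--             compte["autres"] += count
--     return compte
-- ===== SOURCE B (Python) =====
-- def compter_connexions_par_protocoles(connexions_par_protocole):
--     """Staged group-by: one filtered sum per known protocol (alias sets are
--     pairwise disjoint, so first-match == unique-match), then 'autres' as the
--     grand total minus everything matched."""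
--     aliases = {
--         "http": ("http", "80"), "https": ("https", "443"), "ssh": ("ssh", "22"),
--         "dns": ("dns", "53"), "ftp": ("ftp", "21"), "smtp": ("smtp", "25"),
--         "pop3": ("pop3", "110"), "imap": ("imap", "143"), "telnet": ("telnet", "23"),
--     }
--     compte = {proto: sum(c for p, c in connexions_par_protocole.items()
--                          if p.lower() in al)
--               for proto, al in aliases.items()}
--     compte["autres"] = sum(connexions_par_protocole.values()) - sum(compte.values())
--     return compte
-- ===== Notes on version B (the rewrite author's own statement) =====
-- stated objective: alternative
-- what changed: Replaces A's single pass over connections with an inner first-match scan and break flag by a staged group-by: one filtered sum per known protocol (valid because the alias sets are pairwise disjoint), with 'autres' obtained by subtracting the matched totals from the grand total instead of being accumulated.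
import Mathlib
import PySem

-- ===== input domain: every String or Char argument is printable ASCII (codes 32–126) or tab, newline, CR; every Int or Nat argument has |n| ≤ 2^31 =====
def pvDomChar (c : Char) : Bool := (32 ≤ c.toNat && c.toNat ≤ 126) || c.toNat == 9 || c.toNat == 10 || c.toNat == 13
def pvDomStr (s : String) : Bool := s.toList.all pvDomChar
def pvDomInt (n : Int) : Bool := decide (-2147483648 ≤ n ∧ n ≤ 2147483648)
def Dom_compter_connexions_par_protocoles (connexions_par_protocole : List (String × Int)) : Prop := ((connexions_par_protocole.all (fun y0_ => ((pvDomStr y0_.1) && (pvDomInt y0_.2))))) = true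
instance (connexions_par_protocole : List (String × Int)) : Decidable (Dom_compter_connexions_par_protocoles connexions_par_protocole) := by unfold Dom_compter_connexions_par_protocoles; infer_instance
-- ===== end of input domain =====

-- B replaces A's single pass (inner first-match scan + break flag, running totals)
-- by a staged group-by: one filtered sum per known protocol, 'autres' by subtraction.

-- ===== PORT A =====
-- protocoles_connus, in A's insertion order
def pvProtocolesConnus : List (String × List String) :=
  [("http", ["http", "80"]), ("https", ["https", "443"]), ("ssh", ["ssh", "22"]),
   ("dns", ["dns", "53"]), ("ftp", ["ftp", "21"]), ("smtp", ["smtp", "25"]),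
   ("pop3", ["pop3", "110"]), ("imap", ["imap", "143"]), ("telnet", ["telnet", "23"])]

-- A's inner 'for proto, aliases … break' loop with the 'trouve' flag:
-- returns the first matching proto (none = not trouve)
def pvInnerA (t : String) : List (String × List String) → Option String
  | [] => none
  | (proto, aliases) :: rest =>
    if aliases.contains t || t == proto then some proto else pvInnerA t rest

def compter_connexions_par_protocoles (connexions_par_protocole : List (String × Int)) : List (String × Int) :=
  let compte0 : PySem.Dict String Int :=
    (pvProtocolesConnus.foldl (fun d pr => d.insert pr.1 0) PySem.Dict.empty).insert "autres" 0
  (connexions_par_protocole.foldl (fun compte pr =>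
    match pvInnerA (PySem.Str.lower pr.1) pvProtocolesConnus with
    | some proto => compte.insert proto (compte.getD proto 0 + pr.2)
    | none => compte.insert "autres" (compte.getD "autres" 0 + pr.2)) compte0).items

-- ===== PORT B =====
-- Source B's 'aliases' dict
def pvAliases : List (String × (String × String)) :=
  [("http", ("http", "80")), ("https", ("https", "443")), ("ssh", ("ssh", "22")),
   ("dns", ("dns", "53")), ("ftp", ("ftp", "21")), ("smtp", ("smtp", "25")),
   ("pop3", ("pop3", "110")), ("imap", ("imap", "143")), ("telnet", ("telnet", "23"))]

def compter_connexions_par_protocoles_alt (connexions_par_protocole : List (String × Int)) : List (String × Int) :=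
  -- the dict comprehension: one filtered sum per known protocol
  let compte : PySem.Dict String Int :=
    pvAliases.foldl (fun d pr =>
      d.insert pr.1
        (((connexions_par_protocole.filter (fun p =>
            PySem.Str.lower p.1 == pr.2.1 || PySem.Str.lower p.1 == pr.2.2)).map Prod.snd).sum))
      PySem.Dict.empty
  -- compte["autres"] = sum(values of the input) - sum(compte.values())
  (compte.insert "autres"
    ((connexions_par_protocole.map Prod.snd).sum - compte.values.sum)).items

-- ===== PRECONDITION & SPEC =====
def Spec_compter_connexions_par_protocoles (connexions_par_protocole : List (String × Int)) (out : List (String × Int)) : Prop := out = compter_connexions_par_protocoles_alt connexions_par_protocole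
instance (connexions_par_protocole : List (String × Int)) (out : List (String × Int)) : Decidable (Spec_compter_connexions_par_protocoles connexions_par_protocole out) := by unfold Spec_compter_connexions_par_protocoles; infer_instance

-- ===== CLAIM =====
def Claim_equal_compter_connexions_par_protocoles : Prop := ∀ (connexions_par_protocole : List (String × Int)), Dom_compter_connexions_par_protocoles connexions_par_protocole → Spec_compter_connexions_par_protocoles connexions_par_protocole (compter_connexions_par_protocoles connexions_par_protocole)

-- ===== LEMMAS AND PROOFS =====

-- the bucket A's inner loop assigns to a (lowered) key
def pvCl (t : String) : String := (pvInnerA t pvProtocolesConnus).getD "autres"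

lemma pv_step_eq :
    (fun (compte : PySem.Dict String Int) (pr : String × Int) =>
      match pvInnerA (PySem.Str.lower pr.1) pvProtocolesConnus with
      | some proto => compte.insert proto (compte.getD proto 0 + pr.2)
      | none => compte.insert "autres" (compte.getD "autres" 0 + pr.2))
    = (fun (compte : PySem.Dict String Int) (pr : String × Int) =>
        compte.insert (pvCl (PySem.Str.lower pr.1))
          (compte.getD (pvCl (PySem.Str.lower pr.1)) 0 + pr.2)) := by
  funext compte pr
  unfold pvCl
  cases pvInnerA (PySem.Str.lower pr.1) pvProtocolesConnus
  · simp
  · simp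

-- generic accumulation lemma for A's loop
lemma pv_foldA_getD (xs : List (String × Int)) (d : PySem.Dict String Int) (k : String) :
    (xs.foldl (fun compte pr =>
        compte.insert (pvCl (PySem.Str.lower pr.1))
          (compte.getD (pvCl (PySem.Str.lower pr.1)) 0 + pr.2)) d).getD k 0
    = d.getD k 0 + ((xs.filter (fun p => pvCl (PySem.Str.lower p.1) == k)).map Prod.snd).sum := by
  induction xs generalizing d with
  | nil => simp
  | cons p rest ih =>
    simp only [List.foldl_cons, List.filter_cons, ih]
    by_cases h : pvCl (PySem.Str.lower p.1) = k
    · simp [h, PySem.Dict.getD_insert_self]; ring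
    · simp only [PySem.Dict.getD_insert]
      rw [if_neg (fun h' => h h'.symm)]
      simp [h]

-- brute-force classification facts about pvCl, proved by case analysis on t
lemma pv_cl_spec (t : String) :
    ((pvCl t == "http") = (t == "http" || t == "80")) ∧
    ((pvCl t == "https") = (t == "https" || t == "443")) ∧
    ((pvCl t == "ssh") = (t == "ssh" || t == "22")) ∧
    ((pvCl t == "dns") = (t == "dns" || t == "53")) ∧
    ((pvCl t == "ftp") = (t == "ftp" || t == "21")) ∧
    ((pvCl t == "smtp") = (t == "smtp" || t == "25")) ∧
    ((pvCl t == "pop3") = (t == "pop3" || t == "110")) ∧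
    ((pvCl t == "imap") = (t == "imap" || t == "143")) ∧
    ((pvCl t == "telnet") = (t == "telnet" || t == "23")) ∧
    (pvCl t = "http" ∨ pvCl t = "https" ∨ pvCl t = "ssh" ∨ pvCl t = "dns" ∨
     pvCl t = "ftp" ∨ pvCl t = "smtp" ∨ pvCl t = "pop3" ∨ pvCl t = "imap" ∨
     pvCl t = "telnet" ∨ pvCl t = "autres") := by
  simp only [pvCl, pvInnerA, pvProtocolesConnus, List.contains_cons, List.contains_nil]
  by_cases h0 : t = "http"; · subst h0; decide
  by_cases h1 : t = "80"; · subst h1; decide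
  by_cases h2 : t = "https"; · subst h2; decide
  by_cases h3 : t = "443"; · subst h3; decide
  by_cases h4 : t = "ssh"; · subst h4; decide
  by_cases h5 : t = "22"; · subst h5; decide
  by_cases h6 : t = "dns"; · subst h6; decide
  by_cases h7 : t = "53"; · subst h7; decide
  by_cases h8 : t = "ftp"; · subst h8; decide
  by_cases h9 : t = "21"; · subst h9; decide
  by_cases h10 : t = "smtp"; · subst h10; decide
  by_cases h11 : t = "25"; · subst h11; decide
  by_cases h12 : t = "pop3"; · subst h12; decide
  by_cases h13 : t = "110"; · subst h13; decide
  by_cases h14 : t = "imap"; · subst h14; decide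
  by_cases h15 : t = "143"; · subst h15; decide
  by_cases h16 : t = "telnet"; · subst h16; decide
  by_cases h17 : t = "23"; · subst h17; decide
  simp_all

-- a filtered bucket sum, parameterized by bucket name
def pvBucket (xs : List (String × Int)) (k : String) : Int :=
  ((xs.filter (fun p => pvCl (PySem.Str.lower p.1) == k)).map Prod.snd).sum

-- every connection falls in exactly one of the ten buckets
lemma pv_total_split (xs : List (String × Int)) :
    pvBucket xs "http" + pvBucket xs "https" + pvBucket xs "ssh" + pvBucket xs "dns" +
    pvBucket xs "ftp" + pvBucket xs "smtp" + pvBucket xs "pop3" + pvBucket xs "imap" +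
    pvBucket xs "telnet" + pvBucket xs "autres" = (xs.map Prod.snd).sum := by
  induction xs with
  | nil => simp [pvBucket]
  | cons p rest ih =>
    have hm := (pv_cl_spec (PySem.Str.lower p.1)).2.2.2.2.2.2.2.2.2
    simp only [pvBucket, List.filter_cons] at *
    rcases hm with h|h|h|h|h|h|h|h|h|h <;> simp [h] <;> omega

lemma pv_filter_known (xs : List (String × Int)) (k a b : String)
    (h : ∀ t, (pvCl t == k) = (t == a || t == b)) :
    pvBucket xs k
      = ((xs.filter (fun p => PySem.Str.lower p.1 == a || PySem.Str.lower p.1 == b)).map Prod.snd).sum := by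
  unfold pvBucket
  congr 1
  apply congrArg
  apply List.filter_congr
  intro p _
  exact h (PySem.Str.lower p.1)

-- the initial dict of A and the ten bucket names
def pvCompte0 : PySem.Dict String Int :=
  (pvProtocolesConnus.foldl (fun d pr => d.insert pr.1 0) PySem.Dict.empty).insert "autres" 0

def pvK : List String :=
  ["http", "https", "ssh", "dns", "ftp", "smtp", "pop3", "imap", "telnet", "autres"]

lemma pv_cl_mem_pvK (t : String) : pvCl t ∈ pvK := by
  rcases (pv_cl_spec t).2.2.2.2.2.2.2.2.2 with h|h|h|h|h|h|h|h|h|h <;> rw [h] <;> decide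

lemma pv_A_eq (xs : List (String × Int)) :
    compter_connexions_par_protocoles xs
      = pvK.map (fun k => (k, pvBucket xs k)) := by
  simp only [compter_connexions_par_protocoles]
  rw [pv_step_eq]
  rw [show ((pvProtocolesConnus.foldl (fun d pr => d.insert pr.1 0) PySem.Dict.empty).insert "autres" 0) = pvCompte0 from rfl]
  have hkeys : (xs.foldl (fun compte pr =>
      compte.insert (pvCl (PySem.Str.lower pr.1))
        (compte.getD (pvCl (PySem.Str.lower pr.1)) 0 + pr.2)) pvCompte0).keys = pvK := by
    rw [PySem.Dict.keys_foldl_insert_key]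
    have h0 : pvCompte0.keys = pvK := by decide
    rw [h0, PySem.Set.update_eq_append_filter]
    have : (PySem.Set.ofList (xs.map (fun pr => pvCl (PySem.Str.lower pr.1)))).filter
        (fun y => !(PySem.Set.contains pvK y)) = [] := by
      rw [List.filter_eq_nil_iff]
      intro y hy
      have hy' := (PySem.Set.mem_ofList _ _).mp hy
      rcases List.mem_map.mp hy' with ⟨p, _, rfl⟩
      simp [PySem.Set.contains, pv_cl_mem_pvK]
    rw [this, List.append_nil]
  have hnd : (xs.foldl (fun compte pr =>
      compte.insert (pvCl (PySem.Str.lower pr.1))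
        (compte.getD (pvCl (PySem.Str.lower pr.1)) 0 + pr.2)) pvCompte0).keys.Nodup := by
    rw [hkeys]; decide
  rw [PySem.Dict.items_eq_map_keys _ hnd 0, hkeys]
  apply List.map_congr_left
  intro k hk
  have hstart : pvCompte0.getD k 0 = 0 := by
    fin_cases hk <;> decide
  rw [pv_foldA_getD xs pvCompte0 k, hstart, zero_add]
  rfl

lemma pv_B_eq (xs : List (String × Int)) :
    compter_connexions_par_protocoles_alt xs
      = [("http", pvBucket xs "http"), ("https", pvBucket xs "https"),
         ("ssh", pvBucket xs "ssh"), ("dns", pvBucket xs "dns"),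
         ("ftp", pvBucket xs "ftp"), ("smtp", pvBucket xs "smtp"),
         ("pop3", pvBucket xs "pop3"), ("imap", pvBucket xs "imap"),
         ("telnet", pvBucket xs "telnet"), ("autres", pvBucket xs "autres")] := by
  simp only [compter_connexions_par_protocoles_alt]
  have hitems : (pvAliases.foldl (fun d pr =>
      d.insert pr.1
        (((xs.filter (fun p =>
            PySem.Str.lower p.1 == pr.2.1 || PySem.Str.lower p.1 == pr.2.2)).map Prod.snd).sum))
      (PySem.Dict.empty : PySem.Dict String Int)).items
      = pvAliases.map (fun pr => (pr.1,
          (((xs.filter (fun p =>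
            PySem.Str.lower p.1 == pr.2.1 || PySem.Str.lower p.1 == pr.2.2)).map Prod.snd).sum))) := by
    have h := PySem.Dict.items_foldl_insert_fresh pvAliases Prod.fst
      (fun pr => (((xs.filter (fun p =>
          PySem.Str.lower p.1 == pr.2.1 || PySem.Str.lower p.1 == pr.2.2)).map Prod.snd).sum))
      PySem.Dict.empty (by decide) (by decide)
    simpa using h
  have hcont : (pvAliases.foldl (fun d pr =>
      d.insert pr.1
        (((xs.filter (fun p =>
            PySem.Str.lower p.1 == pr.2.1 || PySem.Str.lower p.1 == pr.2.2)).map Prod.snd).sum))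
      (PySem.Dict.empty : PySem.Dict String Int)).contains "autres" = false := by
    rw [PySem.Dict.contains_eq_decide_mem_keys]
    have h2 : (pvAliases.foldl (fun d pr =>
        d.insert pr.1
          (((xs.filter (fun p =>
              PySem.Str.lower p.1 == pr.2.1 || PySem.Str.lower p.1 == pr.2.2)).map Prod.snd).sum))
        (PySem.Dict.empty : PySem.Dict String Int)).keys
        = pvAliases.map Prod.fst := by
      rw [PySem.Dict.keys_foldl_insert_key]; decide
    rw [h2]; decide
  simp only [PySem.Dict.items_insert, hcont, Bool.false_eq_true, if_false]
  rw [show ∀ (d : PySem.Dict String Int), d.values = d.items.map Prod.snd from fun _ => rfl]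
  rw [hitems]
  simp only [pvAliases, List.map, List.sum_cons, List.sum_nil, List.cons_append, List.nil_append]
  rw [← pv_filter_known xs "http" "http" "80" (fun t => (pv_cl_spec t).1),
      ← pv_filter_known xs "https" "https" "443" (fun t => (pv_cl_spec t).2.1),
      ← pv_filter_known xs "ssh" "ssh" "22" (fun t => (pv_cl_spec t).2.2.1),
      ← pv_filter_known xs "dns" "dns" "53" (fun t => (pv_cl_spec t).2.2.2.1),
      ← pv_filter_known xs "ftp" "ftp" "21" (fun t => (pv_cl_spec t).2.2.2.2.1),
      ← pv_filter_known xs "smtp" "smtp" "25" (fun t => (pv_cl_spec t).2.2.2.2.2.1),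
      ← pv_filter_known xs "pop3" "pop3" "110" (fun t => (pv_cl_spec t).2.2.2.2.2.2.1),
      ← pv_filter_known xs "imap" "imap" "143" (fun t => (pv_cl_spec t).2.2.2.2.2.2.2.1),
      ← pv_filter_known xs "telnet" "telnet" "23" (fun t => (pv_cl_spec t).2.2.2.2.2.2.2.2.1)]
  have ht := pv_total_split xs
  simp only [List.cons.injEq, Prod.mk.injEq, and_true, true_and]
  omega

-- ===== VERDICT =====
theorem compter_connexions_par_protocoles_spec : Claim_equal_compter_connexions_par_protocoles := by
  intro xs _
  unfold Spec_compter_connexions_par_protocoles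
  rw [pv_A_eq, pv_B_eq]
  simp only [pvK, List.map]
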